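-- pv_equiv track=rewrite | github.com/nguyentuanninh/ielts-tracking | scripts/recommend_vocab.py | band_for_entry
-- ===== SOURCE A (Python) =====
-- BAND_MAP = {
--     "B1": {"core": ["B1", "B1+"], "stretch": ["B2"], "challenge": ["C1"]},
--     "B1+": {"core": ["B1"], "stretch": ["B2"], "challenge": ["C1"]},
--     "B2": {"core": ["B2"], "stretch": ["C1"], "challenge": ["C2", "C1+"]},
--     "B2+": {"core": ["B2", "B2+"], "stretch": ["C1"], "challenge": ["C2"]},
-- }
--
-- def band_for_entry(level: str, cefr: str) -> str | None:
--     level_map = BAND_MAP.get(level)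
--     if not level_map:
--         # fallback treat as B1 mapping
--         level_map = BAND_MAP["B1"]
--     for band, cefrs in level_map.items():
--         if cefr in cefrs:
--             return band
--     return None
-- ===== SOURCE B (Python) =====
-- def band_for_entry(level: str, cefr: str) -> str | None:
--     # Closed-form decision logic: no table, no scan, no index.
--     lvl = level if level in ("B1", "B1+", "B2", "B2+") else "B1"
--     if lvl in ("B1", "B1+"):
--         if cefr == "B1" or (lvl == "B1" and cefr == "B1+"):
--             return "core"
--         if cefr == "B2":
--             return "stretch"
--         if cefr == "C1":
--             return "challenge"
--     else:
--         if cefr == "B2" or (lvl == "B2+" and cefr == "B2+"):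
--             return "core"
--         if cefr == "C1":
--             return "stretch"
--         if cefr == "C2" or (lvl == "B2" and cefr == "C1+"):
--             return "challenge"
--     return None
-- ===== Notes on version B (the rewrite author's own statement) =====
-- stated objective: alternative
-- what changed: B drops the BAND_MAP table entirely and decides the band with closed-form conditional logic on (normalized level, cefr), instead of selecting a dict row and scanning each band's cefr list for membership.
import Mathlib
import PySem

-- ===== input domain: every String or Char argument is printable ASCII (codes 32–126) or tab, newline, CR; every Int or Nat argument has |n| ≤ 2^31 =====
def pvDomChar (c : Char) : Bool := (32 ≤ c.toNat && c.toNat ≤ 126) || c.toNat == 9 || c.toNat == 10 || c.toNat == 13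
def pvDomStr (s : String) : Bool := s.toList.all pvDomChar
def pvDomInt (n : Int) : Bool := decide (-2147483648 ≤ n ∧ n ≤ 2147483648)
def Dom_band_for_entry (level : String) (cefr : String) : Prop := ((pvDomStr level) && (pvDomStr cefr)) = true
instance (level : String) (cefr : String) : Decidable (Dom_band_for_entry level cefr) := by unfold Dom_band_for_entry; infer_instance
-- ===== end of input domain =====

-- B replaces the table row-select + per-band membership scan by table-free closed-form conditional logic (objective: alternative).

-- ===== PORT A =====
-- module constant BAND_MAP
def pvBandMap : PySem.Dict String (PySem.Dict String (List String)) :=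
  PySem.Dict.ofList
    [ ("B1",  PySem.Dict.ofList [("core", ["B1", "B1+"]), ("stretch", ["B2"]), ("challenge", ["C1"])]),
      ("B1+", PySem.Dict.ofList [("core", ["B1"]), ("stretch", ["B2"]), ("challenge", ["C1"])]),
      ("B2",  PySem.Dict.ofList [("core", ["B2"]), ("stretch", ["C1"]), ("challenge", ["C2", "C1+"])]),
      ("B2+", PySem.Dict.ofList [("core", ["B2", "B2+"]), ("stretch", ["C1"]), ("challenge", ["C2"])]) ]

-- level_map = BAND_MAP.get(level); if not level_map: level_map = BAND_MAP["B1"]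
-- ('not level_map' is true for None and for an empty dict; BAND_MAP["B1"] exists, so getD never defaults)
def pvSelectA (level : String) : PySem.Dict String (List String) :=
  match pvBandMap.get? level with
  | none => (pvBandMap.get? "B1").getD (PySem.Dict.mk [])
  | some m => if m.items = [] then (pvBandMap.get? "B1").getD (PySem.Dict.mk []) else m

-- for band, cefrs in level_map.items(): if cefr in cefrs: return band
def pvBandLoop (cefr : String) : List (String × List String) → Option String
  | [] => none
  | (band, cefrs) :: rest => if cefr ∈ cefrs then some band else pvBandLoop cefr rest

def band_for_entry (level : String) (cefr : String) : Option String :=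
  pvBandLoop cefr (pvSelectA level).items

-- ===== PORT B =====
-- lvl = level if level in ("B1","B1+","B2","B2+") else "B1"; then pure conditional logic
def band_for_entry_alt (level : String) (cefr : String) : Option String :=
  let lvl := if level = "B1" ∨ level = "B1+" ∨ level = "B2" ∨ level = "B2+" then level else "B1"
  if lvl = "B1" ∨ lvl = "B1+" then
    if cefr = "B1" ∨ (lvl = "B1" ∧ cefr = "B1+") then some "core"
    else if cefr = "B2" then some "stretch"
    else if cefr = "C1" then some "challenge"
    else none
  else
    if cefr = "B2" ∨ (lvl = "B2+" ∧ cefr = "B2+") then some "core"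
    else if cefr = "C1" then some "stretch"
    else if cefr = "C2" ∨ (lvl = "B2" ∧ cefr = "C1+") then some "challenge"
    else none

-- ===== PRECONDITION & SPEC =====
def Spec_band_for_entry (level : String) (cefr : String) (out : Option String) : Prop := out = band_for_entry_alt level cefr
instance (level : String) (cefr : String) (out : Option String) : Decidable (Spec_band_for_entry level cefr out) := by unfold Spec_band_for_entry; infer_instance

-- ===== CLAIM =====
def Claim_equal_band_for_entry : Prop := ∀ (level : String) (cefr : String), Dom_band_for_entry level cefr → Spec_band_for_entry level cefr (band_for_entry level cefr)

-- ===== LEMMAS AND PROOFS =====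
-- If level is none of the four keys, both sides reduce to the "B1" behaviour.
theorem get_none_of_not_key (level : String)
    (h1 : ¬ "B1" = level) (h2 : ¬ "B1+" = level) (h3 : ¬ "B2" = level) (h4 : ¬ "B2+" = level) :
    pvBandMap.get? level = none := by
  have hm : pvBandMap = PySem.Dict.mk
      [ ("B1",  PySem.Dict.mk [("core", ["B1", "B1+"]), ("stretch", ["B2"]), ("challenge", ["C1"])]),
        ("B1+", PySem.Dict.mk [("core", ["B1"]), ("stretch", ["B2"]), ("challenge", ["C1"])]),
        ("B2",  PySem.Dict.mk [("core", ["B2"]), ("stretch", ["C1"]), ("challenge", ["C2", "C1+"])]),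
        ("B2+", PySem.Dict.mk [("core", ["B2", "B2+"]), ("stretch", ["C1"]), ("challenge", ["C2"])]) ] := by decide
  rw [hm]; simp [PySem.Dict.get?, h1, h2, h3, h4]

theorem eq_default (level cefr : String)
    (h1 : ¬ "B1" = level) (h2 : ¬ "B1+" = level) (h3 : ¬ "B2" = level) (h4 : ¬ "B2+" = level) :
    band_for_entry level cefr = band_for_entry_alt level cefr := by
  have hA : band_for_entry level cefr = band_for_entry "B1" cefr := by
    unfold band_for_entry pvSelectA
    rw [get_none_of_not_key level h1 h2 h3 h4]
    rfl
  have hB : band_for_entry_alt level cefr = band_for_entry_alt "B1" cefr := by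
    unfold band_for_entry_alt
    have l1 : ¬ level = "B1" := fun e => h1 e.symm
    have l2 : ¬ level = "B1+" := fun e => h2 e.symm
    have l3 : ¬ level = "B2" := fun e => h3 e.symm
    have l4 : ¬ level = "B2+" := fun e => h4 e.symm
    simp [l1, l2, l3, l4]
  rw [hA, hB]
  by_cases c1 : cefr = "B1"
  · subst c1; decide
  by_cases c2 : cefr = "B1+"
  · subst c2; decide
  by_cases c3 : cefr = "B2"
  · subst c3; decide
  by_cases c4 : cefr = "C1"
  · subst c4; decide
  have m1 : ¬ "B1" = cefr := fun e => c1 e.symm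
  have m2 : ¬ "B1+" = cefr := fun e => c2 e.symm
  have m3 : ¬ "B2" = cefr := fun e => c3 e.symm
  have m4 : ¬ "C1" = cefr := fun e => c4 e.symm
  have hi : (pvSelectA "B1").items = [("core", ["B1", "B1+"]), ("stretch", ["B2"]), ("challenge", ["C1"])] := by decide
  unfold band_for_entry
  rw [hi]
  simp [pvBandLoop, band_for_entry_alt, c1, c2, c3, c4, m1, m2, m3, m4]

theorem eq_key (level cefr : String)
    (hk : "B1" = level ∨ "B1+" = level ∨ "B2" = level ∨ "B2+" = level) :
    band_for_entry level cefr = band_for_entry_alt level cefr := by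
  by_cases c1 : cefr = "B1"
  · subst c1; rcases hk with h | h | h | h <;> subst h <;> decide
  by_cases c2 : cefr = "B1+"
  · subst c2; rcases hk with h | h | h | h <;> subst h <;> decide
  by_cases c3 : cefr = "B2"
  · subst c3; rcases hk with h | h | h | h <;> subst h <;> decide
  by_cases c4 : cefr = "B2+"
  · subst c4; rcases hk with h | h | h | h <;> subst h <;> decide
  by_cases c5 : cefr = "C1"
  · subst c5; rcases hk with h | h | h | h <;> subst h <;> decide
  by_cases c6 : cefr = "C1+"
  · subst c6; rcases hk with h | h | h | h <;> subst h <;> decide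
  by_cases c7 : cefr = "C2"
  · subst c7; rcases hk with h | h | h | h <;> subst h <;> decide
  have m1 : ¬ "B1" = cefr := fun e => c1 e.symm
  have m2 : ¬ "B1+" = cefr := fun e => c2 e.symm
  have m3 : ¬ "B2" = cefr := fun e => c3 e.symm
  have m4 : ¬ "B2+" = cefr := fun e => c4 e.symm
  have m5 : ¬ "C1" = cefr := fun e => c5 e.symm
  have m6 : ¬ "C1+" = cefr := fun e => c6 e.symm
  have m7 : ¬ "C2" = cefr := fun e => c7 e.symm
  rcases hk with h | h | h | h <;> subst h <;> unfold band_for_entry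
  · rw [show (pvSelectA "B1").items = [("core", ["B1", "B1+"]), ("stretch", ["B2"]), ("challenge", ["C1"])] from by decide]
    simp [pvBandLoop, band_for_entry_alt, c1, c2, c3, c4, c5, c6, c7, m1, m2, m3, m4, m5, m6, m7]
  · rw [show (pvSelectA "B1+").items = [("core", ["B1"]), ("stretch", ["B2"]), ("challenge", ["C1"])] from by decide]
    simp [pvBandLoop, band_for_entry_alt, c1, c2, c3, c4, c5, c6, c7, m1, m2, m3, m4, m5, m6, m7]
  · rw [show (pvSelectA "B2").items = [("core", ["B2"]), ("stretch", ["C1"]), ("challenge", ["C2", "C1+"])] from by decide]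
    simp [pvBandLoop, band_for_entry_alt, c1, c2, c3, c4, c5, c6, c7, m1, m2, m3, m4, m5, m6, m7]
  · rw [show (pvSelectA "B2+").items = [("core", ["B2", "B2+"]), ("stretch", ["C1"]), ("challenge", ["C2"])] from by decide]
    simp [pvBandLoop, band_for_entry_alt, c1, c2, c3, c4, c5, c6, c7, m1, m2, m3, m4, m5, m6, m7]

-- ===== VERDICT =====
theorem band_for_entry_spec : Claim_equal_band_for_entry := by
  intro level cefr _
  unfold Spec_band_for_entry
  by_cases h1 : "B1" = level
  · exact eq_key level cefr (Or.inl h1)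
  by_cases h2 : "B1+" = level
  · exact eq_key level cefr (Or.inr (Or.inl h2))
  by_cases h3 : "B2" = level
  · exact eq_key level cefr (Or.inr (Or.inr (Or.inl h3)))
  by_cases h4 : "B2+" = level
  · exact eq_key level cefr (Or.inr (Or.inr (Or.inr h4)))
  exact eq_default level cefr h1 h2 h3 h4
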